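-- pv_equiv track=rewrite | github.com/Bruno-PSZ/AMP_Metrics_Evaluation | benchmark_and_plots/utils_sim.py | common_subsequences
-- ===== SOURCE A (Python) =====
-- from typing import List, Literal
--
-- def common_subsequences(seq1: List, seq2: List) -> List[List]:
--     len1, len2 = len(seq1), len(seq2)
--
--     # Use two rows for DP to save memory
--     dp_prev = [0] * (len2 + 1)
--     matches = []
--
--     # Build DP table for longest common suffix lengths,
--     # collecting matches of length greater than 1.
--     for i in range(1, len1 + 1):
--         dp_curr = [0] * (len2 + 1)
--         for j in range(1, len2 + 1):
--             if seq1[i - 1] == seq2[j - 1]: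
--                 dp_curr[j] = dp_prev[j - 1] + 1
--                 if dp_curr[j] > 1:
--                     # Record the start positions and the common subsequence length.
--                     matches.append((i - dp_curr[j], j - dp_curr[j], dp_curr[j]))
--             else:
--                 dp_curr[j] = 0
--         dp_prev = dp_curr
--
--     # Sort matches by descending length.
--     matches.sort(key=lambda x: -x[2])
--
--     # Use lists of booleans for used positions (faster than set intersections)
--     accepted = []
--     used1 = [False] * len1
--     used2 = [False] * len2
--
--     for start1, start2, length in matches:
--         # Check if any positions in this subsequence have been used
--         if any(used1[i] for i in range(start1, start1 + length)) or any(
--                 used2[j] for j in range(start2, start2 + length)):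
--             continue
--         accepted.append(seq1[start1:start1 + length])
--         for i in range(start1, start1 + length):
--             used1[i] = True
--         for j in range(start2, start2 + length):
--             used2[j] = True
--
--     return accepted
-- ===== SOURCE B (Python) =====
-- def common_subsequences(seq1, seq2):
--     n1, n2 = len(seq1), len(seq2)
--
--     # Scan each diagonal once: every maximal run of >=2 consecutive equal
--     # positions starting at (a, b) contributes the prefixes (a, b, 2..R).
--     matches = []
--     starts = [(a, 0) for a in range(n1)] + [(0, b) for b in range(1, n2)]
--     for a0, b0 in starts:
--         m = min(n1 - a0, n2 - b0)
--         t = 0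
--         while t < m:
--             if seq1[a0 + t] == seq2[b0 + t]:
--                 r = t
--                 while r < m and seq1[a0 + r] == seq2[b0 + r]:
--                     r += 1
--                 matches.extend((a0 + t, b0 + t, L) for L in range(2, r - t + 1))
--                 t = r
--             else:
--                 t += 1
--
--     # Longest first; ties by start positions (the order the DP version yields).
--     matches.sort(key=lambda m: (-m[2], m[0], m[1]))
--
--     accepted = []
--     used1 = [False] * n1
--     used2 = [False] * n2
--     for start1, start2, length in matches:
--         if any(used1[i] for i in range(start1, start1 + length)) or any(
--                 used2[j] for j in range(start2, start2 + length)):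
--             continue
--         accepted.append(seq1[start1:start1 + length])
--         for i in range(start1, start1 + length):
--             used1[i] = True
--         for j in range(start2, start2 + length):
--             used2[j] = True
--     return accepted
-- ===== Notes on version B (the rewrite author's own statement) =====
-- stated objective: alternative
-- what changed: Replaces the two-row LCS-suffix DP over rows with a single scan along each diagonal that finds maximal runs of consecutive matches and emits their prefix entries (a,b,2..R), then sorts by the explicit key (-length, start1, start2) instead of relying on a stable sort by length alone.
import Mathlib
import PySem

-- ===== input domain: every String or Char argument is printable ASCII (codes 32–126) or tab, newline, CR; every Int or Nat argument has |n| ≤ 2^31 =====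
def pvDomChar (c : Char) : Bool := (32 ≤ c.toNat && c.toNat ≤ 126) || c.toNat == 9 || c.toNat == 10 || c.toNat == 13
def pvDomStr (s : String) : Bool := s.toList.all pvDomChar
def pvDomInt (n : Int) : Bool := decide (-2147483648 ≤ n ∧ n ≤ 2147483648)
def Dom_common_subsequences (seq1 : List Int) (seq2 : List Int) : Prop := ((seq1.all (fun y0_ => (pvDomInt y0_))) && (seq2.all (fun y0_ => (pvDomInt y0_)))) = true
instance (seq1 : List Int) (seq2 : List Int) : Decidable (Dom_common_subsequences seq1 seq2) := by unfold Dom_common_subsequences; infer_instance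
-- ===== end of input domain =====

-- B replaces the row-by-row two-row DP with a per-diagonal maximal-run scan and an
-- explicit (-length, start1, start2) sort key; same return value, similar cost ("alternative").

-- ===== PORT A =====
-- inner loop body: one step of "for j in range(1, len2+1)" (state = (dp_curr, matches))
def dpInnerStep (seq1 seq2 : List Int) (dpPrev : List Nat) (i : Nat)
    (st2 : List Nat × List (Nat × Nat × Nat)) (j : Nat) : List Nat × List (Nat × Nat × Nat) :=
  if seq1.getD (i - 1) 0 == seq2.getD (j - 1) 0 then
    let v := dpPrev.getD (j - 1) 0 + 1
    (st2.1.set j v, if v > 1 then st2.2 ++ [(i - v, j - v, v)] else st2.2)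
  else
    (st2.1.set j 0, st2.2)

-- the two nested DP loops of A; returns (dp_prev, matches)
def dpLoop (seq1 seq2 : List Int) : List Nat × List (Nat × Nat × Nat) :=
  (List.range' 1 seq1.length).foldl
    (fun st i =>
      (List.range' 1 seq2.length).foldl (dpInnerStep seq1 seq2 st.1 i)
        (List.replicate (seq2.length + 1) 0, st.2))
    (List.replicate (seq2.length + 1) 0, [])

-- one step of the greedy acceptance loop (state = (accepted, used1, used2))
def greedyStepA (seq1 : List Int) (st : List (List Int) × List Bool × List Bool)
    (m : Nat × Nat × Nat) : List (List Int) × List Bool × List Bool :=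
  if ((List.range' m.1 m.2.2).any fun i => st.2.1.getD i false) ||
     ((List.range' m.2.1 m.2.2).any fun j => st.2.2.getD j false) then st
  else
    (st.1 ++ [PySem.List.slice seq1 (some (m.1 : Int)) (some ((m.1 + m.2.2 : Nat) : Int))],
     (List.range' m.1 m.2.2).foldl (fun u i => u.set i true) st.2.1,
     (List.range' m.2.1 m.2.2).foldl (fun u j => u.set j true) st.2.2)

def common_subsequences (seq1 : List Int) (seq2 : List Int) : List (List Int) :=
  ((PySem.List.sorted (dpLoop seq1 seq2).2 (fun x => -(x.2.2 : Int))).foldl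
      (greedyStepA seq1)
      ([], List.replicate seq1.length false, List.replicate seq2.length false)).1

-- ===== PORT B =====
-- inner "while r < m and seq1[a0+r] == seq2[b0+r]: r += 1"
def runEnd (s1 s2 : List Int) (a0 b0 m r : Nat) : Nat :=
  if h : r < m ∧ s1.getD (a0 + r) 0 == s2.getD (b0 + r) 0 then
    runEnd s1 s2 a0 b0 m (r + 1)
  else r
termination_by m - r
decreasing_by omega

theorem runEnd_ge (s1 s2 : List Int) (a0 b0 m r : Nat) : r ≤ runEnd s1 s2 a0 b0 m r := by
  fun_induction runEnd with
  | case1 r h ih => omega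
  | case2 r h => omega

theorem runEnd_gt (s1 s2 : List Int) (a0 b0 m t : Nat) (h1 : t < m)
    (h2 : s1.getD (a0 + t) 0 == s2.getD (b0 + t) 0) : t < runEnd s1 s2 a0 b0 m t := by
  rw [runEnd, dif_pos ⟨h1, h2⟩]
  have := runEnd_ge s1 s2 a0 b0 m (t + 1)
  omega

-- outer "while t < m" over one diagonal, collecting the prefix entries of each maximal run
def scanDiag (s1 s2 : List Int) (a0 b0 m t : Nat) : List (Nat × Nat × Nat) :=
  if h : t < m then
    if hm : s1.getD (a0 + t) 0 == s2.getD (b0 + t) 0 then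
      let r := runEnd s1 s2 a0 b0 m t
      ((List.range' 2 (r - t - 1)).map fun L => (a0 + t, b0 + t, L)) ++
        scanDiag s1 s2 a0 b0 m r
    else scanDiag s1 s2 a0 b0 m (t + 1)
  else []
termination_by m - t
decreasing_by
  · have := runEnd_gt s1 s2 a0 b0 m t h hm
    omega
  · omega

-- the diagonal start cells: left border (a,0) then top border (0,b), b = 1..n2-1
def startsB (n1 n2 : Nat) : List (Nat × Nat) :=
  (List.range n1).map (fun a => (a, 0)) ++ (List.range' 1 (n2 - 1)).map (fun b => (0, b))

-- "for a0, b0 in starts: ... matches.extend(...)"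
def diagMatches (seq1 seq2 : List Int) : List (Nat × Nat × Nat) :=
  (startsB seq1.length seq2.length).foldl
    (fun acc p =>
      acc ++ scanDiag seq1 seq2 p.1 p.2 (min (seq1.length - p.1) (seq2.length - p.2)) 0) []

-- sort key (-length, start1, start2), Python tuple comparison = lexicographic
def keyB (m : Nat × Nat × Nat) : Lex (Int × Lex (Int × Int)) :=
  toLex (-(m.2.2 : Int), toLex ((m.1 : Int), (m.2.1 : Int)))

-- greedy acceptance loop, identical to A's final loop
def greedyStepB (seq1 : List Int) (st : List (List Int) × List Bool × List Bool)
    (m : Nat × Nat × Nat) : List (List Int) × List Bool × List Bool :=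
  if ((List.range' m.1 m.2.2).any fun i => st.2.1.getD i false) ||
     ((List.range' m.2.1 m.2.2).any fun j => st.2.2.getD j false) then st
  else
    (st.1 ++ [PySem.List.slice seq1 (some (m.1 : Int)) (some ((m.1 + m.2.2 : Nat) : Int))],
     (List.range' m.1 m.2.2).foldl (fun u i => u.set i true) st.2.1,
     (List.range' m.2.1 m.2.2).foldl (fun u j => u.set j true) st.2.2)

def common_subsequences_alt (seq1 : List Int) (seq2 : List Int) : List (List Int) :=
  ((PySem.List.sorted (diagMatches seq1 seq2) keyB).foldl
      (greedyStepB seq1)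
      ([], List.replicate seq1.length false, List.replicate seq2.length false)).1

-- ===== PRECONDITION & SPEC =====
def Spec_common_subsequences (seq1 : List Int) (seq2 : List Int) (out : List (List Int)) : Prop := out = common_subsequences_alt seq1 seq2
instance (seq1 : List Int) (seq2 : List Int) (out : List (List Int)) : Decidable (Spec_common_subsequences seq1 seq2 out) := by unfold Spec_common_subsequences; infer_instance

-- ===== CLAIM (what is proved, stated in full; the proofs are below) =====
def Claim_equal_common_subsequences : Prop := ∀ (seq1 : List Int) (seq2 : List Int), Dom_common_subsequences seq1 seq2 → Spec_common_subsequences seq1 seq2 (common_subsequences seq1 seq2)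

-- ===== LEMMAS AND PROOFS =====

-- longest common suffix length of seq1[0:i] and seq2[0:j] (the DP value dp[i][j])
def suff (s1 s2 : List Int) : Nat → Nat → Nat
  | 0, _ => 0
  | _ + 1, 0 => 0
  | i + 1, j + 1 => if s1.getD i 0 == s2.getD j 0 then suff s1 s2 i j + 1 else 0

theorem suff_zero_right (s1 s2 : List Int) (i : Nat) : suff s1 s2 i 0 = 0 := by
  cases i <;> rfl

theorem suff_le (s1 s2 : List Int) (i j : Nat) : suff s1 s2 i j ≤ i ∧ suff s1 s2 i j ≤ j := by
  induction i generalizing j with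
  | zero => simp [suff]
  | succ i ih =>
    cases j with
    | zero => simp [suff]
    | succ j =>
      have := ih j
      simp only [suff]
      split <;> omega

-- the entry the DP records at cell (i, j) (none when the suffix length is < 2)
def ent (s1 s2 : List Int) (c : Nat × Nat) : Option (Nat × Nat × Nat) :=
  if 2 ≤ suff s1 s2 c.1 c.2 then
    some (c.1 - suff s1 s2 c.1 c.2, c.2 - suff s1 s2 c.1 c.2, suff s1 s2 c.1 c.2)
  else none

def rowCells (n1 n2 : Nat) : List (Nat × Nat) :=
  (List.range' 1 n1).flatMap fun i => (List.range' 1 n2).map fun j => (i, j)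

def diagCells (n1 n2 : Nat) : List (Nat × Nat) :=
  (startsB n1 n2).flatMap fun p =>
    (List.range (min (n1 - p.1) (n2 - p.2))).map fun t => (p.1 + t + 1, p.2 + t + 1)

-- row i of the DP table as a list
def rowL (s1 s2 : List Int) (i : Nat) : List Nat :=
  (List.range (s2.length + 1)).map fun j => suff s1 s2 i j

theorem rowL_zero (s1 s2 : List Int) :
    rowL s1 s2 0 = List.replicate (s2.length + 1) 0 := by
  unfold rowL
  rw [List.map_congr_left (g := fun _ => 0) (fun k _ => by simp [suff])]
  simp [List.map_const']

theorem getD_map_range' (f : Nat → Nat) (n k : Nat) :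
    ((List.range n).map f).getD k 0 = if k < n then f k else 0 := by
  rcases Nat.lt_or_ge k n with h | h
  · rw [if_pos h, List.getD_eq_getElem _ _ (by simpa using h)]
    simp
  · rw [if_neg (by omega)]
    exact List.getD_eq_default _ _ (by simpa using h)

theorem set_map_range (f : Nat → Nat) (n j v : Nat) (_hj : j < n) :
    ((List.range n).map f).set j v = (List.range n).map fun k => if k = j then v else f k := by
  apply List.ext_getElem (by simp)
  intro i h1 h2
  simp only [List.getElem_set, List.getElem_map, List.getElem_range]
  by_cases hij : j = i
  · subst hij; simp
  · rw [if_neg hij, if_neg (fun h => hij h.symm)]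

theorem dpInner_spec (s1 s2 : List Int) (i : Nat) (ms0 : List (Nat × Nat × Nat)) (t : Nat)
    (ht : t ≤ s2.length) :
    (List.range' 1 t).foldl (dpInnerStep s1 s2 (rowL s1 s2 i) (i + 1))
      (List.replicate (s2.length + 1) 0, ms0)
    = ((List.range (s2.length + 1)).map fun k => if k ≤ t then suff s1 s2 (i + 1) k else 0,
       ms0 ++ (List.range' 1 t).filterMap fun j => ent s1 s2 (i + 1, j)) := by
  induction t with
  | zero =>
    simp only [List.range', List.foldl_nil, List.filterMap_nil, List.append_nil]
    refine Prod.ext ?_ rfl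
    rw [List.map_congr_left (g := fun _ => 0) ?_]
    · simp [List.map_const']
    · intro k _
      split
      · have hk : k = 0 := by omega
        subst hk
        exact suff_zero_right s1 s2 (i + 1)
      · rfl
  | succ t ih =>
    have hcat : List.range' 1 (t + 1) = List.range' 1 t ++ [t + 1] := by
      rw [List.range'_concat]
      simp [Nat.add_comm]
    rw [hcat, List.foldl_append, ih (by omega)]
    simp only [List.foldl_cons, List.foldl_nil, List.filterMap_append]
    unfold dpInnerStep
    simp only [Nat.add_sub_cancel]
    have hg : (rowL s1 s2 i).getD t 0 = suff s1 s2 i t := by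
      unfold rowL
      rw [getD_map_range', if_pos (show t < s2.length + 1 by omega)]
    rw [hg]
    by_cases hc : s1.getD i 0 == s2.getD t 0
    · rw [if_pos hc]
      have hc' : s1[i]?.getD 0 = s2[t]?.getD 0 := by simpa [List.getD] using hc
      have hs : suff s1 s2 (i + 1) (t + 1) = suff s1 s2 i t + 1 := by
        simp [suff, hc']
      refine Prod.ext ?_ ?_
      · show (_ : List Nat).set (t+1) _ = _
        rw [set_map_range _ _ _ _ (by omega)]
        apply List.map_congr_left
        intro k _
        by_cases hk : k = t + 1
        · subst hk
          rw [if_pos rfl, if_pos (by omega), hs]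
        · rw [if_neg hk]
          by_cases hk2 : k ≤ t
          · rw [if_pos hk2, if_pos (by omega)]
          · rw [if_neg hk2, if_neg (by omega)]
      · show (if suff s1 s2 i t + 1 > 1 then _ ++ [_] else _) = _
        simp only [List.filterMap_cons, List.filterMap_nil]
        unfold ent
        simp only [hs]
        by_cases h2 : 2 ≤ suff s1 s2 i t + 1
        · rw [if_pos (by omega), if_pos h2]
          simp [List.append_assoc]
        · rw [if_neg (by omega), if_neg h2]
          simp
    · rw [if_neg hc]
      have hc' : ¬ s1[i]?.getD 0 = s2[t]?.getD 0 := by simpa [List.getD] using hc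
      have hs : suff s1 s2 (i + 1) (t + 1) = 0 := by
        simp [suff, hc']
      refine Prod.ext ?_ ?_
      · show (_ : List Nat).set (t+1) 0 = _
        rw [set_map_range _ _ _ _ (by omega)]
        apply List.map_congr_left
        intro k _
        by_cases hk : k = t + 1
        · subst hk
          rw [if_pos rfl, if_pos (by omega), hs]
        · rw [if_neg hk]
          by_cases hk2 : k ≤ t
          · rw [if_pos hk2, if_pos (by omega)]
          · rw [if_neg hk2, if_neg (by omega)]
      · show _ = _ ++ _
        simp only [List.filterMap_cons, List.filterMap_nil]
        unfold ent
        simp only [hs]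
        rw [if_neg (by omega)]
        simp

theorem dpLoop_spec (s1 s2 : List Int) (t : Nat) (ht : t ≤ s1.length) :
    (List.range' 1 t).foldl
      (fun st i =>
        (List.range' 1 s2.length).foldl (dpInnerStep s1 s2 st.1 i)
          (List.replicate (s2.length + 1) 0, st.2))
      (List.replicate (s2.length + 1) 0, [])
    = (rowL s1 s2 t,
       (List.range' 1 t).flatMap fun i => (List.range' 1 s2.length).filterMap fun j => ent s1 s2 (i, j)) := by
  induction t with
  | zero =>
    simp only [List.range', List.foldl_nil, List.flatMap_nil]
    exact Prod.ext (rowL_zero s1 s2).symm rfl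
  | succ t ih =>
    have hcat : List.range' 1 (t + 1) = List.range' 1 t ++ [t + 1] := by
      rw [List.range'_concat]
      simp [Nat.add_comm]
    rw [hcat, List.foldl_append, ih (by omega)]
    simp only [List.foldl_cons, List.foldl_nil, List.flatMap_append, List.flatMap_cons,
      List.flatMap_nil, List.append_nil]
    rw [dpInner_spec s1 s2 t _ s2.length (le_refl _)]
    refine Prod.ext ?_ rfl
    apply List.map_congr_left
    intro k hk
    rw [if_pos (by simp at hk; omega)]

theorem matchesA_eq (s1 s2 : List Int) :
    (dpLoop s1 s2).2 = (rowCells s1.length s2.length).filterMap (ent s1 s2) := by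
  unfold dpLoop rowCells
  rw [dpLoop_spec s1 s2 s1.length (le_refl _), List.filterMap_flatMap]
  simp only [List.filterMap_map]
  rfl

-- run facts
theorem runEnd_le (s1 s2 : List Int) (a0 b0 m r : Nat) (h : r ≤ m) :
    runEnd s1 s2 a0 b0 m r ≤ m := by
  fun_induction runEnd with
  | case1 r h' ih => exact ih (by omega)
  | case2 r h' => exact h

theorem runEnd_matches (s1 s2 : List Int) (a0 b0 m r : Nat) :
    ∀ u, r ≤ u → u < runEnd s1 s2 a0 b0 m r → s1.getD (a0 + u) 0 == s2.getD (b0 + u) 0 := by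
  fun_induction runEnd with
  | case1 r h ih =>
    intro u h1 h2
    rcases Nat.eq_or_lt_of_le h1 with rfl | h1
    · exact h.2
    · exact ih u h1 h2
  | case2 r h =>
    intro u h1 h2
    omega

theorem runEnd_stop (s1 s2 : List Int) (a0 b0 m r : Nat) :
    runEnd s1 s2 a0 b0 m r < m →
    ¬ (s1.getD (a0 + runEnd s1 s2 a0 b0 m r) 0 == s2.getD (b0 + runEnd s1 s2 a0 b0 m r) 0) := by
  fun_induction runEnd with
  | case1 r h ih => exact ih
  | case2 r h =>
    intro hlt hmm
    exact h ⟨hlt, hmm⟩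

theorem suff_run (s1 s2 : List Int) (a0 b0 t w : Nat)
    (h0 : suff s1 s2 (a0 + t) (b0 + t) = 0)
    (hm : ∀ u, t ≤ u → u < w → s1.getD (a0 + u) 0 == s2.getD (b0 + u) 0) :
    ∀ u, t ≤ u → u < w → suff s1 s2 (a0 + u + 1) (b0 + u + 1) = u - t + 1 := by
  have key : ∀ d, t + d < w → suff s1 s2 (a0 + (t + d) + 1) (b0 + (t + d) + 1) = d + 1 := by
    intro d
    induction d with
    | zero =>
      intro hw
      have hmt : s1[a0 + t]?.getD 0 = s2[b0 + t]?.getD 0 := by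
        simpa [List.getD] using hm t (le_refl _) (by omega)
      show suff s1 s2 ((a0 + t) + 1) ((b0 + t) + 1) = 1
      simp [suff, hmt, h0]
    | succ d ih =>
      intro hw
      have hmu : s1[a0 + (t + d) + 1]?.getD 0 = s2[b0 + (t + d) + 1]?.getD 0 := by
        simpa [List.getD, show a0 + (t + d) + 1 = a0 + (t + d + 1) by omega,
          show b0 + (t + d) + 1 = b0 + (t + d + 1) by omega] using
          hm (t + d + 1) (by omega) (by omega)
      have e1 : a0 + (t + (d + 1)) + 1 = (a0 + (t + d) + 1) + 1 := by omega
      have e2 : b0 + (t + (d + 1)) + 1 = (b0 + (t + d) + 1) + 1 := by omega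
      rw [e1, e2]
      have hstep : suff s1 s2 ((a0 + (t + d) + 1) + 1) ((b0 + (t + d) + 1) + 1)
          = if s1.getD (a0 + (t + d) + 1) 0 == s2.getD (b0 + (t + d) + 1) 0 then
              suff s1 s2 (a0 + (t + d) + 1) (b0 + (t + d) + 1) + 1 else 0 := rfl
      rw [hstep, if_pos (by simpa [List.getD] using hmu), ih (by omega)]
  intro u h1 h2
  have := key (u - t) (by omega)
  rw [show t + (u - t) = u by omega] at this
  simpa using this

theorem scanDiag_spec (s1 s2 : List Int) (a0 b0 m t : Nat) :
    t ≤ m → (t < m → (suff s1 s2 (a0 + t) (b0 + t) = 0 ∨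
      ¬ (s1.getD (a0 + t) 0 == s2.getD (b0 + t) 0))) →
    scanDiag s1 s2 a0 b0 m t
      = (List.range' t (m - t)).filterMap fun u => ent s1 s2 (a0 + u + 1, b0 + u + 1) := by
  fun_induction scanDiag with
  | case1 t h hm r ih =>
    intro ht hinv
    have hrgt : t < r := runEnd_gt s1 s2 a0 b0 m t h hm
    have hrle : r ≤ m := runEnd_le s1 s2 a0 b0 m t (by omega)
    have hrun : ∀ u, t ≤ u → u < r → s1.getD (a0 + u) 0 == s2.getD (b0 + u) 0 :=
      runEnd_matches s1 s2 a0 b0 m t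
    have h0 : suff s1 s2 (a0 + t) (b0 + t) = 0 := by
      rcases hinv h with h' | h'
      · exact h'
      · exact absurd hm h'
    have hsv := suff_run s1 s2 a0 b0 t r h0 hrun
    rw [ih hrle (fun hrm => Or.inr (runEnd_stop s1 s2 a0 b0 m t hrm))]
    have hsplit : List.range' t (m - t) = List.range' t (r - t) ++ List.range' r (m - r) := by
      have h' := (List.range'_append (s := t) (m := r - t) (n := m - r) (step := 1))
      rw [show t + 1 * (r - t) = r by omega, show (r - t) + (m - r) = m - t by omega] at h'
      exact h'.symm
    rw [hsplit, List.filterMap_append]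
    congr 1
    rw [show r - t = (r - t - 1) + 1 by omega, List.range'_succ, List.filterMap_cons]
    have hent0 : ent s1 s2 (a0 + t + 1, b0 + t + 1) = none := by
      unfold ent
      rw [if_neg]
      have := hsv t (le_refl _) (by omega)
      simp only [this]
      omega
    rw [hent0]
    have hmap : (List.range' (t + 1) (r - t - 1)).filterMap
          (fun u => ent s1 s2 (a0 + u + 1, b0 + u + 1))
        = (List.range' (t + 1) (r - t - 1)).map (fun u => (a0 + t, b0 + t, u - t + 1)) := by
      apply List.filterMap_eq_map_iff_forall_eq_some.mpr
      intro u hu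
      simp only [List.mem_range'] at hu
      obtain ⟨q, hq1, hq2⟩ := hu
      unfold ent
      have hsu := hsv u (by omega) (by omega)
      simp only [hsu]
      rw [if_pos (by omega)]
      have e1 : a0 + u + 1 - (u - t + 1) = a0 + t := by omega
      have e2 : b0 + u + 1 - (u - t + 1) = b0 + t := by omega
      rw [e1, e2]
    rw [hmap]
    apply List.ext_getElem (by simp)
    intro q h1 h2
    simp only [List.getElem_map, List.getElem_range']
    have e1 : t + 1 + 1 * q - t + 1 = 2 + 1 * q := by omega
    rw [e1]
  | case2 t h hm ih =>
    intro ht hinv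
    have hmm : ¬ s1[a0 + t]?.getD 0 = s2[b0 + t]?.getD 0 := by
      simpa [List.getD] using hm
    have hs0 : suff s1 s2 (a0 + t + 1) (b0 + t + 1) = 0 := by
      show suff s1 s2 ((a0 + t) + 1) ((b0 + t) + 1) = 0
      simp [suff, hmm]
    rw [ih (by omega) (fun _ => Or.inl (by
      rw [show a0 + (t + 1) = a0 + t + 1 by omega, show b0 + (t + 1) = b0 + t + 1 by omega]
      exact hs0))]
    rw [show m - t = (m - t - 1) + 1 by omega, List.range'_succ, List.filterMap_cons]
    have hent0 : ent s1 s2 (a0 + t + 1, b0 + t + 1) = none := by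
      unfold ent
      rw [if_neg]
      simp only [hs0]
      omega
    rw [hent0, show m - (t + 1) = m - t - 1 by omega]
  | case3 t h =>
    intro ht hinv
    rw [show m - t = 0 by omega]
    rfl

theorem suff_zero_left (s1 s2 : List Int) (j : Nat) : suff s1 s2 0 j = 0 := rfl

theorem matchesB_eq (s1 s2 : List Int) :
    diagMatches s1 s2 = (diagCells s1.length s2.length).filterMap (ent s1 s2) := by
  unfold diagMatches diagCells
  rw [PySem.List.foldl_append_eq_flatMap, List.nil_append, List.filterMap_flatMap]
  rw [List.flatMap_def, List.flatMap_def]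
  apply congrArg List.flatten
  apply List.map_congr_left
  intro p hp
  have hp0 : p.1 = 0 ∨ p.2 = 0 := by
    unfold startsB at hp
    rcases List.mem_append.mp hp with h | h <;> simp only [List.mem_map] at h <;>
      obtain ⟨x, _, rfl⟩ := h
    · exact Or.inr rfl
    · exact Or.inl rfl
  rw [scanDiag_spec s1 s2 p.1 p.2 _ 0 (by omega) ?_]
  · rw [List.filterMap_map, Nat.sub_zero, List.range_eq_range']
    rfl
  · intro _
    refine Or.inl ?_
    rcases hp0 with h | h <;> rw [h]
    · simpa using suff_zero_left s1 s2 (p.2 + 0)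
    · simpa using suff_zero_right s1 s2 (p.1 + 0)

-- the two cell enumerations are permutations of each other
theorem mem_rowCells (n1 n2 : Nat) (c : Nat × Nat) :
    c ∈ rowCells n1 n2 ↔ 1 ≤ c.1 ∧ c.1 ≤ n1 ∧ 1 ≤ c.2 ∧ c.2 ≤ n2 := by
  unfold rowCells
  simp only [List.mem_flatMap, List.mem_map, List.mem_range'_1]
  constructor
  · rintro ⟨i, hi, j, hj, rfl⟩
    exact ⟨by omega, by omega, by omega, by omega⟩
  · rintro ⟨h1, h2, h3, h4⟩
    exact ⟨c.1, by omega, c.2, by omega, rfl⟩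

theorem mem_diagCells (n1 n2 : Nat) (c : Nat × Nat) :
    c ∈ diagCells n1 n2 ↔ 1 ≤ c.1 ∧ c.1 ≤ n1 ∧ 1 ≤ c.2 ∧ c.2 ≤ n2 := by
  unfold diagCells startsB
  simp only [List.mem_flatMap, List.mem_append, List.mem_map, List.mem_range, List.mem_range'_1]
  constructor
  · rintro ⟨p, hp, t, ht, rfl⟩
    rcases hp with ⟨a, ha, rfl⟩ | ⟨b, hb, rfl⟩ <;> simp only [] <;>
      refine ⟨by omega, by omega, by omega, by omega⟩
  · rintro ⟨h1, h2, h3, h4⟩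
    by_cases hc : c.1 ≤ c.2
    · refine ⟨(0, c.2 - c.1), ?_, c.1 - 1, by omega, ?_⟩
      · by_cases he : c.2 - c.1 = 0
        · exact Or.inl ⟨0, by omega, by rw [he]⟩
        · exact Or.inr ⟨c.2 - c.1, by omega, rfl⟩
      · have : (0 : ℕ) + (c.1 - 1) + 1 = c.1 := by omega
        have h2' : c.2 - c.1 + (c.1 - 1) + 1 = c.2 := by omega
        exact Prod.ext (by simpa using this) (by simpa using h2')
    · refine ⟨(c.1 - c.2, 0), Or.inl ⟨c.1 - c.2, by omega, rfl⟩, c.2 - 1, by omega, ?_⟩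
      have h1' : c.1 - c.2 + (c.2 - 1) + 1 = c.1 := by omega
      have h2' : (0 : ℕ) + (c.2 - 1) + 1 = c.2 := by omega
      exact Prod.ext (by simpa using h1') (by simpa using h2')

theorem nodup_rowCells (n1 n2 : Nat) : (rowCells n1 n2).Nodup := by
  unfold rowCells
  rw [List.nodup_flatMap]
  constructor
  · intro i _
    exact (List.nodup_range' 1).map fun j j' h => congrArg Prod.snd h
  · apply (List.pairwise_lt_range' 1).imp
    intro i i' hlt x hx hy
    simp only [List.mem_map] at hx hy
    obtain ⟨j, _, rfl⟩ := hx
    obtain ⟨j', _, he⟩ := hy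
    have := congrArg Prod.fst he
    simp at this
    omega

theorem nodup_diagCells (n1 n2 : Nat) : (diagCells n1 n2).Nodup := by
  unfold diagCells
  rw [List.nodup_flatMap]
  constructor
  · intro p _
    exact List.nodup_range.map fun t t' h => by
      have := congrArg Prod.fst h
      simp at this
      omega
  · unfold startsB
    have hdis : ∀ p q : ℕ × ℕ, (p.1 = 0 ∨ p.2 = 0) → (q.1 = 0 ∨ q.2 = 0) → p ≠ q →
        ∀ x, x ∈ (List.range (min (n1 - p.1) (n2 - p.2))).map (fun t => (p.1 + t + 1, p.2 + t + 1)) →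
        x ∈ (List.range (min (n1 - q.1) (n2 - q.2))).map (fun t => (q.1 + t + 1, q.2 + t + 1)) → False := by
      intro p q hp hq hne x hx hy
      simp only [List.mem_map, List.mem_range] at hx hy
      obtain ⟨t, _, rfl⟩ := hx
      obtain ⟨t', _, he⟩ := hy
      have e1 := congrArg Prod.fst he
      have e2 := congrArg Prod.snd he
      simp only [] at e1 e2
      apply hne
      have : p.1 = q.1 ∧ p.2 = q.2 := by omega
      exact Prod.ext this.1 this.2
    rw [List.pairwise_append]
    refine ⟨?_, ?_, ?_⟩
    · rw [List.pairwise_map]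
      apply (List.pairwise_lt_range).imp
      intro a a' hlt
      exact hdis _ _ (Or.inr rfl) (Or.inr rfl) (by simp; omega)
    · rw [List.pairwise_map]
      apply (List.pairwise_lt_range').imp
      intro b b' hlt
      exact hdis _ _ (Or.inl rfl) (Or.inl rfl) (by simp; omega)
    · intro u hu v hv
      simp only [List.mem_map, List.mem_range, List.mem_range'_1] at hu hv
      obtain ⟨a, ha, rfl⟩ := hu
      obtain ⟨b, hb, rfl⟩ := hv
      exact hdis _ _ (Or.inr rfl) (Or.inl rfl) (by simp; omega)

theorem cells_perm (n1 n2 : Nat) : (rowCells n1 n2).Perm (diagCells n1 n2) := by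
  refine (List.perm_ext_iff_of_nodup (nodup_rowCells n1 n2) (nodup_diagCells n1 n2)).mpr ?_
  intro c
  rw [mem_rowCells, mem_diagCells]

theorem matches_perm (s1 s2 : List Int) :
    (dpLoop s1 s2).2.Perm (diagMatches s1 s2) := by
  rw [matchesA_eq, matchesB_eq]
  exact (cells_perm _ _).filterMap _

-- keyB is injective
theorem keyB_inj : Function.Injective keyB := by
  intro a b h
  have h1 := congrArg (fun x => (ofLex x).1) h
  have h2 := congrArg (fun x => (ofLex (ofLex x).2).1) h
  have h3 := congrArg (fun x => (ofLex (ofLex x).2).2) h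
  simp only [keyB, ofLex_toLex] at h1 h2 h3
  exact Prod.ext (by omega) (Prod.ext (by omega) (by omega))

theorem ent_some (s1 s2 : List Int) (c : Nat × Nat) (b : Nat × Nat × Nat)
    (h : ent s1 s2 c = some b) :
    b.2.2 = suff s1 s2 c.1 c.2 ∧ 2 ≤ b.2.2 ∧ c.1 = b.1 + b.2.2 ∧ c.2 = b.2.1 + b.2.2 := by
  unfold ent at h
  split at h
  · rename_i h2
    obtain ⟨hle1, hle2⟩ := suff_le s1 s2 c.1 c.2
    cases h
    refine ⟨rfl, h2, ?_, ?_⟩ <;> dsimp only <;> omega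
  · exact absurd h (by simp)

-- the DP generation order breaks -length ties in keyB order
theorem ties_pairwise (s1 s2 : List Int) :
    (dpLoop s1 s2).2.Pairwise fun x y => -(x.2.2 : Int) = -(y.2.2 : Int) → keyB x < keyB y := by
  rw [matchesA_eq, List.pairwise_filterMap]
  have hrm : (rowCells s1.length s2.length).Pairwise
      fun c c' => c.1 < c'.1 ∨ (c.1 = c'.1 ∧ c.2 < c'.2) := by
    unfold rowCells
    rw [List.pairwise_flatMap]
    constructor
    · intro i _
      rw [List.pairwise_map]
      exact (List.pairwise_lt_range' 1).imp fun h => Or.inr ⟨rfl, h⟩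
    · apply (List.pairwise_lt_range' 1).imp
      intro i i' hlt x hx y hy
      simp only [List.mem_map] at hx hy
      obtain ⟨j, _, rfl⟩ := hx
      obtain ⟨j', _, rfl⟩ := hy
      exact Or.inl hlt
  apply hrm.imp
  intro c c' hcc b hb b' hb'
  obtain ⟨hL, h2, hc1, hc2⟩ := ent_some s1 s2 c b hb
  obtain ⟨hL', h2', hc1', hc2'⟩ := ent_some s1 s2 c' b' hb'
  intro hkey
  have hLL : b.2.2 = b'.2.2 := by omega
  unfold keyB
  rw [Prod.Lex.toLex_lt_toLex]
  refine Or.inr ⟨by rw [hLL], ?_⟩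
  rw [Prod.Lex.toLex_lt_toLex]
  rcases hcc with h | ⟨he, hlt⟩
  · exact Or.inl (by push_cast; omega)
  · refine Or.inr ⟨by push_cast; omega, by push_cast; omega⟩

-- a stable sort by k equals the sort by a refinement k' when the input breaks k-ties in k'-order
theorem insertBy_congr {α : Type} (f g : α → α → Bool) (x : α) (l : List α)
    (h : ∀ a ∈ l, f x a = g x a) :
    PySem.List.insertBy f x l = PySem.List.insertBy g x l := by
  induction l with
  | nil => rfl
  | cons y ys ih =>
    simp only [PySem.List.insertBy]
    rw [h y (by simp)]
    split
    · rfl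
    · rw [ih fun a ha => h a (by simp [ha])]

theorem sorted_refine {α : Type} (k : α → Int) (k' : α → Lex (Int × Lex (Int × Int)))
    (H1 : ∀ x y, k x < k y → k' x < k' y) (xs : List α)
    (hties : xs.Pairwise fun x y => k x = k y → k' x < k' y) :
    PySem.List.sorted xs k = PySem.List.sorted xs k' := by
  rw [PySem.List.sorted_eq_foldl_insertBy, PySem.List.sorted_eq_foldl_insertBy]
  suffices h : ∀ (ys : List α) (acc : List α),
      ys.Pairwise (fun x y => k x = k y → k' x < k' y) →
      (∀ x ∈ ys, ∀ a ∈ acc, (k x < k a ↔ k' x < k' a)) →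
      ys.foldl (fun acc x => PySem.List.insertBy (fun a b => decide (k a < k b)) x acc) acc
        = ys.foldl (fun acc x => PySem.List.insertBy (fun a b => decide (k' a < k' b)) x acc) acc by
    exact h xs [] hties (by simp)
  intro ys
  induction ys with
  | nil => intros; rfl
  | cons x rest ih =>
    intro acc hp hiff
    simp only [List.foldl_cons]
    have hstep : PySem.List.insertBy (fun a b => decide (k a < k b)) x acc
        = PySem.List.insertBy (fun a b => decide (k' a < k' b)) x acc :=
      insertBy_congr _ _ x acc fun a ha =>
        decide_eq_decide.mpr (hiff x (by simp) a ha)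
    rw [hstep]
    apply ih
    · exact (List.pairwise_cons.mp hp).2
    intro y hy a ha
    rcases (PySem.List.mem_insertBy _ _ _ _).mp ha with rfl | ha'
    · have T := (List.pairwise_cons.mp hp).1 y hy
      constructor
      · intro h'
        exact H1 _ _ h'
      · intro h'
        by_contra hno
        rcases eq_or_lt_of_le (not_lt.mp hno) with he | hl
        · exact absurd h' (asymm (T he))
        · exact absurd h' (asymm (H1 _ _ hl))
    · exact hiff y (by simp [hy]) a ha'

theorem sorted_eq (s1 s2 : List Int) :
    PySem.List.sorted (dpLoop s1 s2).2 (fun x => -(x.2.2 : Int))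
      = PySem.List.sorted (diagMatches s1 s2) keyB := by
  rw [sorted_refine (fun x => -(x.2.2 : Int)) keyB ?_ _ (ties_pairwise s1 s2)]
  · exact PySem.List.sorted_eq_sorted_of_perm _ _ keyB keyB_inj (matches_perm s1 s2)
  · intro x y h
    rw [keyB, keyB, Prod.Lex.toLex_lt_toLex]
    exact Or.inl h

-- ===== VERDICT (by name: the statement is the Claim_ definition above) =====
theorem common_subsequences_spec : Claim_equal_common_subsequences := by
  intro seq1 seq2 _
  unfold Spec_common_subsequences common_subsequences common_subsequences_alt
  rw [sorted_eq]
  rfl
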